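-- pv_equiv track=rewrite | github.com/puar-playground/MusiXQA | util/music_record.py | beat_split_beat
-- ===== SOURCE A (Python) =====
-- def get_beat_tie_list(n, beat_tie, split='note'):
--         out = [False for _ in range(n)]
--         if beat_tie == 0:
--             return out
--         elif split=='note':
--             out[0] = True
--             return out
--         elif split=='beat':
--             out[-1] = True
--             return out
--
-- def beat_split_beat(tempo_list, pitch_list, beat_len=4):
--     beat_len_list = []
--     beat_pitch_list = []
--     connect_list = []
--
--     len_temp = []
--     pitch_temp = []
--
--     for t, p in zip(tempo_list, pitch_list):
--         while t > 0:
--             available_space = beat_len - sum(len_temp)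
--
--             if t <= available_space:
--                 # Add the entire value to the current beat
--                 len_temp.append(t)
--                 pitch_temp.append(p)
--                 t = 0
--
--                 if sum(len_temp) == beat_len:
--                     # Current beat is full
--                     beat_len_list.append(len_temp)
--                     beat_pitch_list.append(pitch_temp)
--                     connect_list.append(0)
--                     len_temp = []
--                     pitch_temp = []
--             else:
--                 # Fill the current beat and carry over the rest
--                 len_temp.append(available_space)
--                 pitch_temp.append(p)
--                 t -= available_space
--                 beat_len_list.append(len_temp)
--                 beat_pitch_list.append(pitch_temp)
--                 connect_list.append(1)
--                 len_temp = []
--                 pitch_temp = []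
--
--     # merge quarters to half
--     i = 0
--     while i < len(beat_len_list) - 1:
--         # Check if the condition is met
--         if beat_len_list[i] == [4] and beat_len_list[i + 1] == [4] and connect_list[i] == 1:
--             # Merge the lists and update a[i+1]
--             beat_len_list[i + 1] = [8]
--             # Remove the current entry a[i] and b[i]
--             beat_len_list.pop(i)
--             beat_pitch_list.pop(i)
--             connect_list.pop(i)
--
--         else:
--             # Move to the next index only if no merge occurs
--             i += 1
--
--     # strech list of lists to single list
--     connect_list = [get_beat_tie_list(len(beat_len), beat_tie, split='beat') for beat_len, beat_tie in zip(beat_len_list, connect_list)]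
--     beat_len_list = sum(beat_len_list, [])
--     beat_pitch_list = sum(beat_pitch_list, [])
--     connect_list = sum(connect_list, [])
--
--
--     return beat_len_list, beat_pitch_list, connect_list
-- ===== SOURCE B (Python) =====
-- def beat_split_beat(tempo_list, pitch_list, beat_len=4):
--     L = beat_len
--     # Phase 1 (boundary-driven): walk a running offset `pos` on a timeline;
--     # split each note at beat boundaries via closed-form divmod instead of an
--     # incremental fill loop.  The trailing partial beat is dropped, as in A.
--     beats = []            # list of (lens, pitches, connect)
--     cur_l, cur_p = [], []
--     pos = 0
--     for t, p in zip(tempo_list, pitch_list):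
--         if t <= 0:
--             continue
--         end = pos + t
--         bnd = (pos // L + 1) * L          # next beat boundary strictly past pos
--         if end < bnd:
--             cur_l.append(t)
--             cur_p.append(p)
--         elif end == bnd:
--             beats.append((cur_l + [t], cur_p + [p], 0))
--             cur_l, cur_p = [], []
--         else:
--             beats.append((cur_l + [bnd - pos], cur_p + [p], 1))
--             q, r = divmod(end - bnd, L)
--             if r == 0:
--                 beats += [([L], [p], 1)] * (q - 1)
--                 beats.append(([L], [p], 0))
--                 cur_l, cur_p = [], []
--             else:
--                 beats += [([L], [p], 1)] * q
--                 cur_l, cur_p = [r], [p]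
--         pos = end
--
--     # Phase 2: merge a tied pair of [4] beats into one [8] beat, consuming two
--     # items per merge in a single left-to-right pass.
--     merged = []
--     k, n = 0, len(beats)
--     while k < n:
--         l, pch, c = beats[k]
--         if c == 1 and l == [4] and k + 1 < n and beats[k + 1][0] == [4]:
--             merged.append(([8], beats[k + 1][1], beats[k + 1][2]))
--             k += 2
--         else:
--             merged.append((l, pch, c))
--             k += 1
--
--     # Phase 3: flatten, the tie flag going on the last note of each beat.
--     len_out, pitch_out, conn_out = [], [], []
--     for l, pch, c in merged:
--         len_out += l
--         pitch_out += pch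
--         conn_out += [False] * (len(l) - 1) + [c != 0]
--     return len_out, pitch_out, conn_out
-- ===== Notes on version B (the rewrite author's own statement) =====
-- stated objective: faster
-- what changed: Phase 1 is boundary-driven: a running timeline offset with closed-form divmod splitting per note replaces A's incremental fill loop that re-sums the open beat on every iteration; the merge becomes a single pass consuming two items per merge instead of A's index loop with pop(i); the flatten builds all three outputs in one loop instead of a comprehension plus three sum(...,[]) passes.
import Mathlib
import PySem

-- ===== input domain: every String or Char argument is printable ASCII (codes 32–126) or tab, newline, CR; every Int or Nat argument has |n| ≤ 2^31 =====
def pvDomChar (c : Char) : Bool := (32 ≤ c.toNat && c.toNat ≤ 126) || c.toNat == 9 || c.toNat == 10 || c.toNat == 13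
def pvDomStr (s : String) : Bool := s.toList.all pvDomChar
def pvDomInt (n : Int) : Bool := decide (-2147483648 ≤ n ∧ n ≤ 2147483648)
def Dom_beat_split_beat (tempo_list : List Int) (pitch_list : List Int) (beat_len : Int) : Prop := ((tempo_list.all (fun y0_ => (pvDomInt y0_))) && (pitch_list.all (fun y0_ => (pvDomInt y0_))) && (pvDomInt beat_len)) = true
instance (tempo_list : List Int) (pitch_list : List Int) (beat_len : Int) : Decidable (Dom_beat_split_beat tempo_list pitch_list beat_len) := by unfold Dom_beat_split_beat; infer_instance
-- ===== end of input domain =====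

-- B re-implements the beat splitter boundary-driven: a running timeline offset with closed-form
-- divmod splitting per note, a single-pass pair-consuming merge, and a one-loop flatten, instead
-- of A's incremental fill loop (which re-sums the open beat each iteration) and index-rewriting
-- merge with pop(i); objective: faster.

-- ===== PORT A =====
-- A's phase-1 state: (beat_len_list, beat_pitch_list, connect_list, len_temp, pitch_temp)
abbrev StA := List (List Int) × List (List Int) × List Int × List Int × List Int

-- inner `while t > 0` loop of A's phase 1; the `t <= available_space` branch sets t = 0, i.e.
-- leaves the loop, so only the carry branch recurses.  fuel := t.toNat + 1 bounds the iteration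
-- count whenever beat_len ≥ 1 (each carry step shrinks t by available_space ≥ 1); on inputs
-- where the Python loop diverges (beat_len ≤ 0 with some t > 0, excluded by Pre_) fuel runs out.
def noteLoopA (L : Int) : Nat → Int → Int → StA → StA
  | 0, _, _, st => st
  | fuel + 1, t, p, (bl, bp, cl, lt, pt) =>
    if 0 < t then
      let avail := L - lt.sum
      if t ≤ avail then
        let lt' := lt ++ [t]
        let pt' := pt ++ [p]
        if lt'.sum = L then (bl ++ [lt'], bp ++ [pt'], cl ++ [(0 : Int)], [], [])
        else (bl, bp, cl, lt', pt')
      else noteLoopA L fuel (t - avail) p (bl ++ [lt ++ [avail]], bp ++ [pt ++ [p]], cl ++ [(1 : Int)], [], [])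
    else (bl, bp, cl, lt, pt)

-- A's `while i < len(beat_len_list) - 1` merge loop over the three parallel lists (pop(i) = eraseIdx)
def mergeLoopA (bl bp : List (List Int)) (cl : List Int) (i : Nat) : List (List Int) × List (List Int) × List Int :=
  if h : i + 1 < bl.length then
    if bl.getD i [] = [4] ∧ bl.getD (i + 1) [] = [4] ∧ cl.getD i 0 = 1 then
      mergeLoopA ((bl.set (i + 1) [8]).eraseIdx i) (bp.eraseIdx i) (cl.eraseIdx i) i
    else mergeLoopA bl bp cl (i + 1)
  else (bl, bp, cl)
termination_by bl.length - i
decreasing_by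
  · have hi : i < bl.length := by omega
    simp only [List.length_eraseIdx, List.length_set, if_pos hi]; omega
  · omega

-- get_beat_tie_list(n, beat_tie, split='beat') (the only call site); `out[-1] = True` is exact
-- for n ≥ 1 (every beat holds at least one note here; n = 0 would raise IndexError in Python)
def getBeatTieList (n : Int) (beat_tie : Int) : List Bool :=
  let out := List.replicate n.toNat false
  if beat_tie = 0 then out else out.set (n.toNat - 1) true

def beat_split_beat (tempo_list : List Int) (pitch_list : List Int) (beat_len : Int) : List Int × List Int × List Bool :=
  let st := (tempo_list.zip pitch_list).foldl
    (fun st tp => noteLoopA beat_len (tp.1.toNat + 1) tp.1 tp.2 st) ([], [], [], [], [])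
  let m := mergeLoopA st.1 st.2.1 st.2.2.1 0
  let conn := List.zipWith (fun bln bt => getBeatTieList (bln.length : Int) bt) m.1 m.2.2
  (m.1.flatten, m.2.1.flatten, conn.flatten)

-- ===== PORT B =====
-- a beat: (segment lengths, segment pitches, connect flag)
abbrev Beat := List Int × List Int × Int
-- B's phase-1 state: (beats, cur_l, cur_p, pos)
abbrev StB := List Beat × List Int × List Int × Int

-- one note of B's phase 1: split the interval [pos, pos+t) at beat boundaries by divmod
def stepB (L : Int) (st : StB) (tp : Int × Int) : StB :=
  let (beats, curl, curp, pos) := st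
  let (t, p) := tp
  if t ≤ 0 then st
  else
    let e := pos + t
    let bnd := (PySem.Int.floordiv pos L + 1) * L
    if e < bnd then (beats, curl ++ [t], curp ++ [p], e)
    else if e = bnd then (beats ++ [(curl ++ [t], curp ++ [p], (0 : Int))], [], [], e)
    else
      let beats1 := beats ++ [(curl ++ [bnd - pos], curp ++ [p], (1 : Int))]
      let q := PySem.Int.floordiv (e - bnd) L
      let r := PySem.Int.mod (e - bnd) L
      if r = 0 then (beats1 ++ List.replicate (q - 1).toNat ([L], [p], (1 : Int)) ++ [([L], [p], (0 : Int))], [], [], e)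
      else (beats1 ++ List.replicate q.toNat ([L], [p], (1 : Int)), [r], [p], e)

-- B's single-pass merge: a tied pair of [4] beats becomes one [8] beat, consuming two items
def mergeLoopB (beats : List Beat) (k : Nat) : List Beat :=
  if h : k < beats.length then
    let b := beats.getD k ([], [], 0)
    if b.2.2 = 1 ∧ b.1 = [4] ∧ k + 1 < beats.length ∧ (beats.getD (k + 1) ([], [], 0)).1 = [4] then
      ([8], (beats.getD (k + 1) ([], [], 0)).2.1, (beats.getD (k + 1) ([], [], 0)).2.2) :: mergeLoopB beats (k + 2)
    else b :: mergeLoopB beats (k + 1)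
  else []
termination_by beats.length - k

def beat_split_beat_alt (tempo_list : List Int) (pitch_list : List Int) (beat_len : Int) : List Int × List Int × List Bool :=
  let st := (tempo_list.zip pitch_list).foldl (stepB beat_len) ([], [], [], 0)
  let merged := mergeLoopB st.1 0
  merged.foldl
    (fun out b =>
      (out.1 ++ b.1, out.2.1 ++ b.2.1,
       out.2.2 ++ (List.replicate (b.1.length - 1) false ++ [decide (b.2.2 ≠ 0)])))
    ([], [], [])

-- ===== PRECONDITION & SPEC =====
-- Pre_ excludes exactly the inputs on which Python A never returns: with beat_len ≤ 0 and some
-- zipped tempo > 0 the while-loop's available_space is ≤ 0, t never shrinks, and A loops forever;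
-- A returns normally on every other input.
def Pre_beat_split_beat (tempo_list : List Int) (pitch_list : List Int) (beat_len : Int) : Prop :=
  1 ≤ beat_len ∨ ∀ tp ∈ tempo_list.zip pitch_list, tp.1 ≤ 0
instance (tempo_list : List Int) (pitch_list : List Int) (beat_len : Int) : Decidable (Pre_beat_split_beat tempo_list pitch_list beat_len) := by unfold Pre_beat_split_beat; infer_instance

def pvWitness_beat_split_beat : List Int × List Int × Int := ([5, 3, 2, 4, 4], [60, 62, 64, 65, 67], 4)

def Spec_beat_split_beat (tempo_list : List Int) (pitch_list : List Int) (beat_len : Int) (out : List Int × List Int × List Bool) : Prop := out = beat_split_beat_alt tempo_list pitch_list beat_len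
instance (tempo_list : List Int) (pitch_list : List Int) (beat_len : Int) (out : List Int × List Int × List Bool) : Decidable (Spec_beat_split_beat tempo_list pitch_list beat_len out) := by unfold Spec_beat_split_beat; infer_instance

-- ===== CLAIM (what is proved, stated in full; the proofs are below) =====
def Claim_equal_beat_split_beat : Prop := ∀ (tempo_list : List Int) (pitch_list : List Int) (beat_len : Int), Dom_beat_split_beat tempo_list pitch_list beat_len → Pre_beat_split_beat tempo_list pitch_list beat_len → Spec_beat_split_beat tempo_list pitch_list beat_len (beat_split_beat tempo_list pitch_list beat_len)

-- ===== LEMMAS AND PROOFS =====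

-- structural specification of the (identical) merge phase of both ports
def mergeS : List Beat → List Beat
  | [] => []
  | [a] => [a]
  | a :: b :: r =>
    if a.1 = [4] ∧ b.1 = [4] ∧ a.2.2 = 1 then ([8], b.2.1, b.2.2) :: mergeS r
    else a :: mergeS (b :: r)

lemma mergeS_cons_not4 (a : Beat) (r : List Beat) (h : a.1 ≠ [4]) :
    mergeS (a :: r) = a :: mergeS r := by
  cases r with
  | nil => rfl
  | cons b r => simp [mergeS, h]

lemma mergeS_nonempty (M : List Beat) (h : ∀ x ∈ M, x.1 ≠ []) :
    ∀ x ∈ mergeS M, x.1 ≠ [] := by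
  induction M using mergeS.induct with
  | case1 => simp [mergeS]
  | case2 a => simpa [mergeS] using h
  | case3 a b r hc ih =>
    intro x hx
    simp only [mergeS, if_pos hc, List.mem_cons] at hx
    rcases hx with hx | hx
    · subst hx; simp
    · exact ih (fun y hy => h y (by simp [hy])) x hx
  | case4 a b r hc ih =>
    intro x hx
    simp only [mergeS, if_neg hc, List.mem_cons] at hx
    rcases hx with hx | hx
    · exact hx ▸ h a (by simp)
    · exact ih (fun y hy => h y (by simp at hy ⊢; tauto)) x (by simpa using hx)

-- B's merge loop computes mergeS of the suffix it has not consumed yet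
lemma mergeLoopB_eq (beats : List Beat) (k : Nat) :
    mergeLoopB beats k = mergeS (beats.drop k) := by
  induction k using mergeLoopB.induct (beats := beats) with
  | case1 k h b hc ih =>
    have hk1 : k + 1 < beats.length := hc.2.2.1
    rw [mergeLoopB, dif_pos h, if_pos hc]
    rw [List.drop_eq_getElem_cons h, List.drop_eq_getElem_cons hk1]
    simp only [b, List.getD_eq_getElem _ _ h, List.getD_eq_getElem _ _ hk1] at hc ⊢
    rw [mergeS, if_pos ⟨hc.2.1, hc.2.2.2, hc.1⟩, ih]
  | case2 k h b hc ih =>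
    rw [mergeLoopB, dif_pos h, if_neg hc]
    simp only [b, List.getD_eq_getElem _ _ h] at hc ⊢
    rw [List.drop_eq_getElem_cons h, ih]
    by_cases hk1 : k + 1 < beats.length
    · rw [List.drop_eq_getElem_cons hk1]
      simp only [List.getD_eq_getElem _ _ hk1] at hc
      rw [mergeS, if_neg (by tauto), ← List.drop_eq_getElem_cons hk1]
    · rw [List.drop_eq_nil_of_le (by omega)]
      rfl
  | case3 k h =>
    rw [mergeLoopB, dif_neg h, List.drop_eq_nil_of_le (by omega)]
    rfl

lemma erase_set_succ {α : Type} (X : List α) (k : Nat) (v : α) (h : k + 1 < X.length) :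
    (X.set (k + 1) v).eraseIdx k = X.take k ++ v :: X.drop (k + 2) := by
  rw [List.set_eq_take_cons_drop v h, List.eraseIdx_eq_take_drop_succ]
  rw [List.take_append_of_le_length (by simp; omega), List.take_take, min_eq_left (by omega)]
  rw [List.drop_append_of_le_length (by simp; omega)]
  have h2 : (X.take (k + 1)).drop (k + 1) = [] := by simp
  rw [h2]
  simp

lemma erase_succ {α : Type} (X : List α) (k : Nat) (h : k + 1 < X.length) :
    X.eraseIdx k = X.take k ++ X[k + 1] :: X.drop (k + 2) := by
  rw [List.eraseIdx_eq_take_drop_succ, List.drop_eq_getElem_cons h]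

-- A's index-rewriting merge loop, run on the projections of a beats list, also computes mergeS
lemma mergeLoopA_eq' : ∀ (n : Nat) (beats : List Beat) (k : Nat), beats.length - k ≤ n →
    mergeLoopA (beats.map (·.1)) (beats.map (·.2.1)) (beats.map (·.2.2)) k
      = ((beats.take k ++ mergeS (beats.drop k)).map (·.1),
         (beats.take k ++ mergeS (beats.drop k)).map (·.2.1),
         (beats.take k ++ mergeS (beats.drop k)).map (·.2.2)) := by
  intro n
  induction n with
  | zero =>
    intro beats k hn
    rw [mergeLoopA.eq_def, dif_neg (show ¬ k + 1 < (beats.map (·.1)).length by simp only [List.length_map]; omega)]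
    rw [List.drop_eq_nil_of_le (by omega), List.take_of_length_le (by omega)]
    simp [mergeS]
  | succ n ih =>
    intro beats k hn
    by_cases hk1 : k + 1 < beats.length
    · have hk : k < beats.length := by omega
      rw [mergeLoopA.eq_def]
      rw [dif_pos (show k + 1 < (beats.map (·.1)).length by simp only [List.length_map]; exact hk1)]
      have g1 : (beats.map (·.1)).getD k [] = beats[k].1 := by
        rw [List.getD_eq_getElem _ _ (by simpa using hk)]; simp
      have g2 : (beats.map (·.1)).getD (k + 1) [] = beats[k + 1].1 := by
        rw [List.getD_eq_getElem _ _ (by simpa using hk1)]; simp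
      have g3 : (beats.map (·.2.2)).getD k 0 = beats[k].2.2 := by
        rw [List.getD_eq_getElem _ _ (by simpa using hk)]; simp
      rw [g1, g2, g3]
      rw [List.drop_eq_getElem_cons hk, List.drop_eq_getElem_cons hk1]
      by_cases hc : beats[k].1 = [4] ∧ beats[k + 1].1 = [4] ∧ beats[k].2.2 = 1
      · rw [if_pos hc]
        have e1 : ((beats.map (·.1)).set (k + 1) [8]).eraseIdx k
            = ((beats.take k ++ ([8], beats[k + 1].2.1, beats[k + 1].2.2) :: beats.drop (k + 2)).map (·.1)) := by
          rw [erase_set_succ _ _ _ (by simpa using hk1)]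
          simp [List.map_take, List.map_drop]
        have e2 : (beats.map (·.2.1)).eraseIdx k
            = ((beats.take k ++ ([8], beats[k + 1].2.1, beats[k + 1].2.2) :: beats.drop (k + 2)).map (·.2.1)) := by
          rw [erase_succ _ _ (by simpa using hk1)]
          simp [List.map_take, List.map_drop]
        have e3 : (beats.map (·.2.2)).eraseIdx k
            = ((beats.take k ++ ([8], beats[k + 1].2.1, beats[k + 1].2.2) :: beats.drop (k + 2)).map (·.2.2)) := by
          rw [erase_succ _ _ (by simpa using hk1)]
          simp [List.map_take, List.map_drop]
        rw [e1, e2, e3]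
        rw [ih _ k (by simp; omega)]
        have t1 : (beats.take k ++ ([8], beats[k + 1].2.1, beats[k + 1].2.2) :: beats.drop (k + 2)).take k
            = beats.take k := List.take_left' (by simp; omega)
        have d1 : (beats.take k ++ ([8], beats[k + 1].2.1, beats[k + 1].2.2) :: beats.drop (k + 2)).drop k
            = ([8], beats[k + 1].2.1, beats[k + 1].2.2) :: beats.drop (k + 2) := List.drop_left' (by simp; omega)
        rw [t1, d1, mergeS_cons_not4 _ _ (by simp)]
        rw [show mergeS (beats[k] :: beats[k + 1] :: beats.drop (k + 2))
            = ([8], beats[k + 1].2.1, beats[k + 1].2.2) :: mergeS (beats.drop (k + 2)) by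
          rw [mergeS, if_pos hc]]
      · rw [if_neg hc]
        rw [ih beats (k + 1) (by omega)]
        rw [show mergeS (beats[k] :: beats[k + 1] :: beats.drop (k + 2))
            = beats[k] :: mergeS (beats[k + 1] :: beats.drop (k + 2)) by
          rw [mergeS, if_neg hc]]
        rw [List.take_succ_eq_append_getElem hk, ← List.drop_eq_getElem_cons hk1]
        simp only [Prod.mk.injEq, List.map_append, List.map_take, List.map_cons]
        refine ⟨?_, ?_, ?_⟩ <;> simp
    · rw [mergeLoopA.eq_def, dif_neg (show ¬ k + 1 < (beats.map (·.1)).length by simp only [List.length_map]; exact hk1)]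
      have hd : beats.drop k = [] ∨ ∃ a, beats.drop k = [a] := by
        cases hdk : beats.drop k with
        | nil => exact Or.inl rfl
        | cons a t =>
          right
          refine ⟨a, ?_⟩
          have : t.length = 0 := by
            have := congrArg List.length hdk
            simp at this; omega
          simp [List.length_eq_zero_iff.mp this] at hdk ⊢
      have hms : mergeS (beats.drop k) = beats.drop k := by
        rcases hd with hd | ⟨a, hd⟩ <;> rw [hd] <;> rfl
      rw [hms, List.take_append_drop]

-- the carry branch of A's inner loop, started from an empty temp, in closed divmod form
lemma carryA (L : Int) (hL : 1 ≤ L) :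
    ∀ (fuel : Nat) (t p : Int) (bl bp : List (List Int)) (cl : List Int), 0 < t → t.toNat ≤ fuel →
    noteLoopA L fuel t p (bl, bp, cl, [], []) =
      (if t % L = 0
       then (bl ++ List.replicate (t / L - 1).toNat [L] ++ [[L]],
             bp ++ List.replicate (t / L - 1).toNat [p] ++ [[p]],
             cl ++ List.replicate (t / L - 1).toNat 1 ++ [(0 : Int)], [], [])
       else (bl ++ List.replicate (t / L).toNat [L],
             bp ++ List.replicate (t / L).toNat [p],
             cl ++ List.replicate (t / L).toNat 1, [t % L], [p])) := by
  intro fuel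
  induction fuel with
  | zero => intro t p bl bp cl ht hf; omega
  | succ fuel ih =>
    intro t p bl bp cl ht hf
    simp only [noteLoopA, if_pos ht, List.sum_nil, sub_zero, List.nil_append]
    by_cases hle : t ≤ L
    · rw [if_pos hle]
      simp only [List.sum_cons, List.sum_nil, add_zero]
      by_cases heq : t = L
      · rw [if_pos heq]
        subst heq
        rw [if_pos (show t % t = 0 by simp)]
        rw [Int.ediv_self (by omega)]
        simp
      · rw [if_neg heq]
        have hmod : t % L = t := Int.emod_eq_of_lt (by omega) (by omega)
        have hdiv : t / L = 0 := Int.ediv_eq_zero_of_lt (by omega) (by omega)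
        rw [if_neg (by omega)]
        simp [hmod, hdiv]
    · rw [if_neg hle]
      rw [ih (t - L) p (bl ++ [[L]]) (bp ++ [[p]]) (cl ++ [1]) (by omega) (by omega)]
      have hmod : (t - L) % L = t % L := Int.sub_emod_right t L
      have hdiv : (t - L) / L = t / L - 1 := by
        have := Int.add_mul_ediv_right t (-1) (show L ≠ 0 by omega)
        simpa [sub_eq_add_neg] using this
      have hq1 : 1 ≤ t / L := by
        rw [Int.le_ediv_iff_mul_le (by omega)]; omega
      rw [hmod, hdiv]
      by_cases hr : t % L = 0
      · rw [if_pos hr, if_pos hr]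
        have hdvd : L ∣ t := Int.dvd_of_emod_eq_zero hr
        obtain ⟨m, hm⟩ := hdvd
        have hm1 : 1 < m := by
          have : L * 1 < L * m := by omega
          exact lt_of_mul_lt_mul_left this (by omega)
        have hq2 : 2 ≤ t / L := by
          rw [Int.le_ediv_iff_mul_le (by omega)]
          calc 2 * L = L * 2 := by ring
          _ ≤ L * m := by
            apply mul_le_mul_of_nonneg_left (by omega) (by omega)
          _ = t := hm.symm
        have hrep : ∀ (x : List Int), List.replicate (t / L - 1).toNat x = x :: List.replicate (t / L - 1 - 1).toNat x := by
          intro x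
          have : (t / L - 1).toNat = (t / L - 1 - 1).toNat + 1 := by omega
          rw [this, List.replicate_succ]
        rw [hrep, hrep, show ∀ (x : Int), List.replicate (t / L - 1).toNat x = x :: List.replicate (t / L - 1 - 1).toNat x from fun x => by
          have : (t / L - 1).toNat = (t / L - 1 - 1).toNat + 1 := by omega
          rw [this, List.replicate_succ]]
        simp
      · rw [if_neg hr, if_neg hr]
        have hrep : ∀ {α : Type} (x : α), List.replicate (t / L).toNat x = x :: List.replicate (t / L - 1).toNat x := by
          intro α x
          have : (t / L).toNat = (t / L - 1).toNat + 1 := by omega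
          rw [this, List.replicate_succ]
        rw [hrep, hrep, hrep]
        simp

-- the simulation relation between A's and B's phase-1 states
def SRel (L : Int) (a : StA) (b : StB) : Prop :=
  a.1 = b.1.map (·.1) ∧ a.2.1 = b.1.map (·.2.1) ∧ a.2.2.1 = b.1.map (·.2.2) ∧
  a.2.2.2.1 = b.2.1 ∧ a.2.2.2.2 = b.2.2.1 ∧
  b.2.1.sum = b.2.2.2 - L * b.1.length ∧ 0 ≤ b.2.1.sum ∧ b.2.1.sum < L ∧
  (∀ x ∈ b.1, x.1 ≠ [])

lemma step_rel (L : Int) (hL : 1 ≤ L) (a : StA) (b : StB) (tp : Int × Int) (h : SRel L a b) :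
    SRel L (noteLoopA L (tp.1.toNat + 1) tp.1 tp.2 a) (stepB L b tp) := by
  obtain ⟨bl, bp, cl, lt, pt⟩ := a
  obtain ⟨beats, curl, curp, pos⟩ := b
  obtain ⟨t, p⟩ := tp
  obtain ⟨h1, h2, h3, h4, h5, hsum, hge, hlt, hne⟩ := h
  simp only at h1 h2 h3 h4 h5 hsum hge hlt hne ⊢
  rw [h1, h2, h3, h4, h5]
  by_cases ht : 0 < t
  · have hlen0 : (0:Int) ≤ L * beats.length := by positivity
    have hpos : 0 ≤ pos := by omega
    have hfd : PySem.Int.floordiv pos L = (beats.length : Int) := by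
      rw [PySem.Int.floordiv_eq_ediv_of_pos (by omega)]
      have : pos = curl.sum + L * (beats.length : Int) := by omega
      rw [this, Int.add_mul_ediv_left _ _ (show L ≠ 0 by omega),
        Int.ediv_eq_zero_of_lt hge hlt]
      simp
    have hbnd : (PySem.Int.floordiv pos L + 1) * L - pos = L - curl.sum := by
      rw [hfd]; linear_combination hsum
    simp only [stepB, if_neg (show ¬ t ≤ 0 by omega)]
    simp only [noteLoopA, if_pos ht]
    by_cases h1c : t ≤ L - curl.sum
    · rw [if_pos h1c]
      by_cases h2c : (curl ++ [t]).sum = L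
      · rw [if_pos h2c]
        simp only [List.sum_append, List.sum_cons, List.sum_nil, add_zero] at h2c
        rw [if_neg (show ¬ pos + t < (PySem.Int.floordiv pos L + 1) * L by omega),
          if_pos (show pos + t = (PySem.Int.floordiv pos L + 1) * L by omega)]
        refine ⟨by simp, by simp, by simp, rfl, rfl, ?_, by simp only [List.sum_nil]; omega, by simp only [List.sum_nil]; omega, ?_⟩
        · simp only [List.length_append, List.length_cons, List.length_nil, List.sum_nil]
          push_cast
          linear_combination hsum - h2c
        · intro x hx
          simp only [List.mem_append, List.mem_singleton] at hx
          rcases hx with hx | hx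
          · exact hne x hx
          · subst hx; simp
      · rw [if_neg h2c]
        simp only [List.sum_append, List.sum_cons, List.sum_nil, add_zero] at h2c
        rw [if_pos (show pos + t < (PySem.Int.floordiv pos L + 1) * L by omega)]
        refine ⟨rfl, rfl, rfl, rfl, rfl, ?_, by simp only [List.sum_append, List.sum_cons, List.sum_nil]; omega, ?_, hne⟩
        · simp only [List.sum_append, List.sum_cons, List.sum_nil, add_zero]
          omega
        · simp only [List.sum_append, List.sum_cons, List.sum_nil, add_zero]
          omega
    · rw [if_neg h1c]
      have havail1 : 1 ≤ L - curl.sum := by omega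
      set t' := t - (L - curl.sum) with ht'
      have ht'0 : 0 < t' := by omega
      rw [carryA L hL t.toNat t' p _ _ _ ht'0 (by omega)]
      rw [if_neg (show ¬ pos + t < (PySem.Int.floordiv pos L + 1) * L by omega),
        if_neg (show ¬ pos + t = (PySem.Int.floordiv pos L + 1) * L by omega)]
      rw [hfd]
      have hb2 : ((beats.length : Int) + 1) * L - pos = L - curl.sum := by rw [← hfd]; exact hbnd
      rw [show pos + t - ((beats.length : Int) + 1) * L = t' by omega]
      rw [show PySem.Int.floordiv t' L = t' / L from PySem.Int.floordiv_eq_ediv_of_pos (by omega)]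
      rw [show PySem.Int.mod t' L = t' % L from PySem.Int.mod_eq_emod_of_pos (by omega)]
      have hq := Int.mul_ediv_add_emod t' L
      have hdivnn : 0 ≤ t' / L := Int.ediv_nonneg (by omega) (by omega)
      have hr0 : 0 ≤ t' % L := Int.emod_nonneg t' (by omega)
      have hrL : t' % L < L := Int.emod_lt_of_pos t' (by omega)
      have hq1 : 1 ≤ t' / L ∨ (t' / L = 0 ∧ t' % L = t') := by
        by_cases hc : L ≤ t'
        · left; rw [Int.le_ediv_iff_mul_le (by omega)]; omega
        · right
          constructor
          · exact Int.ediv_eq_zero_of_lt (by omega) (by omega)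
          · exact Int.emod_eq_of_lt (by omega) (by omega)
      by_cases hr : t' % L = 0
      · rw [if_pos hr, if_pos hr]
        have hq2 : 1 ≤ t' / L := by
          rcases hq1 with h | ⟨h0, hh⟩
          · exact h
          · omega
        refine ⟨?_, ?_, ?_, rfl, rfl, ?_, by simp only [List.sum_nil]; omega, by simp only [List.sum_nil]; omega, ?_⟩
        · simp [List.map_append, List.map_replicate, hb2]
        · simp [List.map_append, List.map_replicate]
        · simp [List.map_append, List.map_replicate]
        · simp only [List.length_append, List.length_replicate, List.length_cons,
            List.length_nil, List.sum_nil]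
          push_cast
          have htn : (((t' / L - 1).toNat : Int)) = t' / L - 1 := by omega
          rw [htn]
          have hq' : L * (t' / L) = t' := by omega
          linear_combination hsum + ht' + hq'
        · intro x hx
          simp only [List.mem_append, List.mem_singleton, List.mem_replicate] at hx
          rcases hx with ((hx | hx) | hx) | hx
          · exact hne x hx
          · subst hx; simp
          · rw [hx.2]; simp
          · subst hx; simp
      · rw [if_neg hr, if_neg hr]
        refine ⟨?_, ?_, ?_, rfl, rfl, ?_, by simp only [List.sum_cons, List.sum_nil]; omega, by simp only [List.sum_cons, List.sum_nil]; omega, ?_⟩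
        · simp [List.map_append, List.map_replicate, hb2]
        · simp [List.map_append, List.map_replicate]
        · simp [List.map_append, List.map_replicate]
        · simp only [List.length_append, List.length_replicate, List.length_cons,
            List.length_nil, List.sum_cons, List.sum_nil, add_zero]
          push_cast
          have htn : (((t' / L).toNat : Int)) = t' / L := by omega
          rw [htn]
          linear_combination hq + hsum + ht'
        · intro x hx
          simp only [List.mem_append, List.mem_singleton, List.mem_replicate] at hx
          rcases hx with (hx | hx) | hx
          · exact hne x hx
          · subst hx; simp
          · rw [hx.2]; simp
  · simp only [noteLoopA, if_neg ht, stepB, if_pos (show t ≤ 0 by omega)]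
    exact ⟨rfl, rfl, rfl, rfl, rfl, hsum, hge, hlt, hne⟩

lemma fold_rel (L : Int) (hL : 1 ≤ L) (pairs : List (Int × Int)) (a : StA) (b : StB) (h : SRel L a b) :
    SRel L (pairs.foldl (fun st tp => noteLoopA L (tp.1.toNat + 1) tp.1 tp.2 st) a)
          (pairs.foldl (stepB L) b) := by
  induction pairs generalizing a b with
  | nil => exact h
  | cons tp rest ih => exact ih _ _ (step_rel L hL a b tp h)

-- per-beat tie list: with ≥ 1 notes in the beat, A's get_beat_tie_list is B's replicate ++ [flag]
lemma tie_eq (n : Nat) (hn : 1 ≤ n) (c : Int) :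
    getBeatTieList (n : Int) c = List.replicate (n - 1) false ++ [decide (c ≠ 0)] := by
  obtain ⟨m, rfl⟩ : ∃ m, n = m + 1 := ⟨n - 1, by omega⟩
  unfold getBeatTieList
  by_cases hc : c = 0
  · simp [hc, List.replicate_succ']
  · simp only [if_neg hc, Int.toNat_natCast, Nat.add_sub_cancel]
    rw [List.replicate_succ']
    simp [hc]

-- flatten phase: A's comprehension + sum(…, []) equals B's single accumulating fold
lemma flat_fold (M : List Beat) (h : ∀ x ∈ M, x.1 ≠ []) (acc : List Int × List Int × List Bool) :
    M.foldl
      (fun out b =>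
        (out.1 ++ b.1, out.2.1 ++ b.2.1,
         out.2.2 ++ (List.replicate (b.1.length - 1) false ++ [decide (b.2.2 ≠ 0)]))) acc
      = (acc.1 ++ (M.map (·.1)).flatten, acc.2.1 ++ (M.map (·.2.1)).flatten,
         acc.2.2 ++ (List.zipWith (fun bln bt => getBeatTieList (bln.length : Int) bt)
            (M.map (·.1)) (M.map (·.2.2))).flatten) := by
  induction M generalizing acc with
  | nil => simp
  | cons b M ih =>
    simp only [List.foldl_cons, List.map_cons, List.zipWith_cons_cons, List.flatten_cons]
    rw [ih (fun x hx => h x (by simp [hx]))]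
    have hb : b.1 ≠ [] := h b (by simp)
    have hlen : 1 ≤ b.1.length := by
      cases hb' : b.1 with
      | nil => exact absurd hb' hb
      | cons y ys => simp
    rw [tie_eq _ hlen]
    simp

-- when every zipped tempo is ≤ 0, neither phase-1 fold moves
lemma foldA_id (L : Int) (pairs : List (Int × Int)) (h : ∀ tp ∈ pairs, tp.1 ≤ 0) (st : StA) :
    pairs.foldl (fun st tp => noteLoopA L (tp.1.toNat + 1) tp.1 tp.2 st) st = st := by
  induction pairs generalizing st with
  | nil => rfl
  | cons tp rest ih =>
    obtain ⟨bl, bp, cl, lt, pt⟩ := st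
    rw [List.foldl_cons]
    rw [show noteLoopA L (tp.1.toNat + 1) tp.1 tp.2 (bl, bp, cl, lt, pt) = (bl, bp, cl, lt, pt) by
      simp only [noteLoopA, if_neg (show ¬ (0:Int) < tp.1 by have := h tp (by simp); omega)]]
    exact ih (fun x hx => h x (by simp [hx])) _

lemma foldB_id (L : Int) (pairs : List (Int × Int)) (h : ∀ tp ∈ pairs, tp.1 ≤ 0) (st : StB) :
    pairs.foldl (stepB L) st = st := by
  induction pairs generalizing st with
  | nil => rfl
  | cons tp rest ih =>
    obtain ⟨beats, curl, curp, pos⟩ := st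
    obtain ⟨t, p⟩ := tp
    rw [List.foldl_cons]
    rw [show stepB L (beats, curl, curp, pos) (t, p) = (beats, curl, curp, pos) by
      simp only [stepB, if_pos (show t ≤ 0 by have := h (t, p) (by simp); omega)]]
    exact ih (fun x hx => h x (by simp [hx])) _

-- ===== VERDICT (by name: the statement is the Claim_ definition above) =====
theorem beat_split_beat_spec : Claim_equal_beat_split_beat := by
  unfold Claim_equal_beat_split_beat
  intro tl pl L _hdom hpre
  unfold Spec_beat_split_beat
  by_cases hL : 1 ≤ L
  · have h0 : SRel L ([], [], [], [], []) ([], [], [], 0) := by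
      refine ⟨rfl, rfl, rfl, rfl, rfl, by simp, by simp, by simp; omega, by simp⟩
    simp only [beat_split_beat, beat_split_beat_alt]
    set sb := (tl.zip pl).foldl (stepB L) ([], [], [], 0) with hsb
    set sa := (tl.zip pl).foldl (fun st tp => noteLoopA L (tp.1.toNat + 1) tp.1 tp.2 st) ([], [], [], [], []) with hsa
    have hrel := fold_rel L hL (tl.zip pl) _ _ h0
    rw [← hsa, ← hsb] at hrel
    obtain ⟨e1, e2, e3, _, _, _, _, _, hne⟩ := hrel
    rw [e1, e2, e3]
    rw [mergeLoopA_eq' sb.1.length sb.1 0 (by omega), mergeLoopB_eq]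
    simp only [List.take_zero, List.drop_zero, List.nil_append]
    rw [flat_fold _ (mergeS_nonempty _ hne)]
    simp
  · have hall : ∀ tp ∈ tl.zip pl, tp.1 ≤ 0 := hpre.resolve_left hL
    simp only [beat_split_beat, beat_split_beat_alt]
    rw [foldA_id L _ hall, foldB_id L _ hall]
    rw [mergeLoopA.eq_def, dif_neg (by simp), mergeLoopB.eq_def, dif_neg (by simp)]
    simp
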